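-- pv_equiv track=rewrite | github.com/FernandoPose/Curso-Python-UNSAM-2021 | Trabajos Prácticos/Clase02/ej_2_14.py | obtener_geringoso
-- ===== SOURCE A (Python) =====
-- def obtener_geringoso(vCadena):
--     nCadena = ' '
--     for c in vCadena:
--         if c == 'a':
--             nCadena = nCadena + c + 'p' + c
--         elif c == 'e':
--             nCadena = nCadena + c + 'p' + c
--         elif c == 'i':
--             nCadena = nCadena + c + 'p' + c
--         elif c == 'o':
--             nCadena = nCadena + c + 'p' + c
--         elif c == 'u':
--             nCadena = nCadena + c + 'p' + c
--         else:
--             nCadena = nCadena + c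
--     return nCadena
-- ===== SOURCE B (Python) =====
-- def obtener_geringoso(vCadena):
--     return ' ' + (vCadena.replace('a', 'apa')
--                          .replace('e', 'epe')
--                          .replace('i', 'ipi')
--                          .replace('o', 'opo')
--                          .replace('u', 'upu'))
-- ===== Notes on version B (the rewrite author's own statement) =====
-- stated objective: idiomatic
-- what changed: Replaced the per-character accumulator loop with a chain of five str.replace calls (one full-string scan per vowel), prepending the leading space once.
import Mathlib
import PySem

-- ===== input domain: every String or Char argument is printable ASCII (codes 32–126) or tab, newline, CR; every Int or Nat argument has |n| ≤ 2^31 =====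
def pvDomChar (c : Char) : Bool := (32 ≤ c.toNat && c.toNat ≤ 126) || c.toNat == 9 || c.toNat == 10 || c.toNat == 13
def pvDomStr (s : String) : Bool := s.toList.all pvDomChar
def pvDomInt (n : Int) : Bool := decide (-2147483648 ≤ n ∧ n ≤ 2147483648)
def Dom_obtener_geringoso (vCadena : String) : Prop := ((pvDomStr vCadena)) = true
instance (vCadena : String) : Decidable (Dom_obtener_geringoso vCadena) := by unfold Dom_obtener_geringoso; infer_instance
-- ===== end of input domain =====

-- B replaces A's per-character accumulator loop by a chain of five str.replace calls (idiomatic; not faster).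


-- ===== PORT A =====
-- nCadena = ' '; for c in vCadena: each vowel branch appends c + 'p' + c, else appends c.
def obtener_geringoso (vCadena : String) : String :=
  String.ofList
    (vCadena.toList.foldl
      (fun nCadena c =>
        if c = 'a' then nCadena ++ [c, 'p', c]
        else if c = 'e' then nCadena ++ [c, 'p', c]
        else if c = 'i' then nCadena ++ [c, 'p', c]
        else if c = 'o' then nCadena ++ [c, 'p', c]
        else if c = 'u' then nCadena ++ [c, 'p', c]
        else nCadena ++ [c])
      [' '])

-- ===== PORT B =====
-- ' ' + vCadena.replace('a','apa').replace('e','epe').replace('i','ipi').replace('o','opo').replace('u','upu')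
def obtener_geringoso_alt (vCadena : String) : String :=
  String.ofList (' ' ::
    (PySem.Str.replace
      (PySem.Str.replace
        (PySem.Str.replace
          (PySem.Str.replace
            (PySem.Str.replace vCadena "a" "apa")
            "e" "epe")
          "i" "ipi")
        "o" "opo")
      "u" "upu").toList)

-- ===== PRECONDITION & SPEC =====
def Spec_obtener_geringoso (vCadena : String) (out : String) : Prop := out = obtener_geringoso_alt vCadena
instance (vCadena : String) (out : String) : Decidable (Spec_obtener_geringoso vCadena out) := by unfold Spec_obtener_geringoso; infer_instance

-- ===== CLAIM (what is proved, stated in full; the proofs are below) =====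
def Claim_equal_obtener_geringoso : Prop := ∀ (vCadena : String), Dom_obtener_geringoso vCadena → Spec_obtener_geringoso vCadena (obtener_geringoso vCadena)

-- ===== LEMMAS AND PROOFS =====

-- the worker of PySem.Chars.replace, specialised to a one-character pattern
theorem pvGoSingle (v : Char) (new : List Char) :
    ∀ (l : List Char) (fuel : Nat) (acc : List Char), l.length ≤ fuel →
      PySem.Chars.replace.go [v] new fuel l acc
        = acc.reverse ++ l.flatMap (fun c => if c = v then new else [c]) := by
  intro l
  induction l with
  | nil =>
    intro fuel acc _
    cases fuel <;> simp [PySem.Chars.replace.go]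
  | cons c t ih =>
    intro fuel acc h
    cases fuel with
    | zero => simp at h
    | succ n =>
      rw [PySem.Chars.replace.go]
      by_cases hc : c = v
      · subst hc
        simp only [List.isPrefixOf, BEq.rfl, Bool.true_and, if_pos]
        have hd : List.drop (List.length [c]) (c :: t) = t := rfl
        rw [hd, ih n (List.reverse new ++ acc) (by simpa using h)]
        simp
      · have : List.isPrefixOf [v] (c :: t) = false := by
          simp [List.isPrefixOf]
          exact fun he => (hc he.symm).elim
        rw [this]
        simp only [Bool.false_eq_true, if_false]
        rw [ih n (c :: acc) (by simpa using Nat.le_of_succ_le_succ h)]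
        simp [hc]

-- Python's s.replace(v, new) for a single-character v is a flatMap over the characters
theorem pvReplaceSingle (v : Char) (new : List Char) (l : List Char) :
    PySem.Chars.replace l [v] new = l.flatMap (fun c => if c = v then new else [c]) := by
  rw [PySem.Chars.replace]
  simp only [List.isEmpty_cons, Bool.false_eq_true, if_false]
  simpa using pvGoSingle v new l l.length [] le_rfl

-- the per-character output of A's loop body
def pvGA (c : Char) : List Char :=
  if c = 'a' then [c, 'p', c]
  else if c = 'e' then [c, 'p', c]
  else if c = 'i' then [c, 'p', c]
  else if c = 'o' then [c, 'p', c]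
  else if c = 'u' then [c, 'p', c]
  else [c]

-- the per-character flatMap of one replace call
def pvHv (v : Char) (c : Char) : List Char := if c = v then [v, 'p', v] else [c]

-- one character through the five replaces = one character through A's branch chain
theorem pvPointwise (c : Char) :
    (((((pvHv 'a' c).flatMap (pvHv 'e')).flatMap (pvHv 'i')).flatMap (pvHv 'o')).flatMap (pvHv 'u')) = pvGA c := by
  by_cases ha : c = 'a'
  · subst ha; decide
  by_cases he : c = 'e'
  · subst he; decide
  by_cases hi : c = 'i'
  · subst hi; decide
  by_cases ho : c = 'o'
  · subst ho; decide
  by_cases hu : c = 'u'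
  · subst hu; decide
  · simp [pvHv, pvGA, ha, he, hi, ho, hu]

-- the five flatMaps fuse into A's single per-character flatMap
theorem pvChain (l : List Char) :
    ((((l.flatMap (pvHv 'a')).flatMap (pvHv 'e')).flatMap (pvHv 'i')).flatMap (pvHv 'o')).flatMap (pvHv 'u')
      = l.flatMap pvGA := by
  induction l with
  | nil => rfl
  | cons c t ih =>
    simp only [List.flatMap_cons, List.flatMap_append]
    rw [ih, pvPointwise]

theorem pvMain (l : List Char) :
    l.foldl
      (fun nCadena c =>
        if c = 'a' then nCadena ++ [c, 'p', c]
        else if c = 'e' then nCadena ++ [c, 'p', c]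
        else if c = 'i' then nCadena ++ [c, 'p', c]
        else if c = 'o' then nCadena ++ [c, 'p', c]
        else if c = 'u' then nCadena ++ [c, 'p', c]
        else nCadena ++ [c])
      [' ']
    = ' ' :: (PySem.Chars.replace (PySem.Chars.replace (PySem.Chars.replace (PySem.Chars.replace (PySem.Chars.replace l ['a'] ['a','p','a']) ['e'] ['e','p','e']) ['i'] ['i','p','i']) ['o'] ['o','p','o']) ['u'] ['u','p','u']) := by
  have hstep : (fun (nCadena : List Char) (c : Char) =>
        if c = 'a' then nCadena ++ [c, 'p', c]
        else if c = 'e' then nCadena ++ [c, 'p', c]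
        else if c = 'i' then nCadena ++ [c, 'p', c]
        else if c = 'o' then nCadena ++ [c, 'p', c]
        else if c = 'u' then nCadena ++ [c, 'p', c]
        else nCadena ++ [c]) = (fun nCadena c => nCadena ++ pvGA c) := by
    funext acc c; simp only [pvGA]; split_ifs <;> rfl
  rw [hstep, PySem.List.foldl_append_eq_flatMap]
  rw [pvReplaceSingle, pvReplaceSingle, pvReplaceSingle, pvReplaceSingle, pvReplaceSingle]
  show [' '] ++ l.flatMap pvGA = ' ' :: ((((l.flatMap (pvHv 'a')).flatMap (pvHv 'e')).flatMap (pvHv 'i')).flatMap (pvHv 'o')).flatMap (pvHv 'u')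
  rw [pvChain]
  rfl

-- ===== VERDICT (by name: the statement is the Claim_ definition above) =====
theorem obtener_geringoso_spec : Claim_equal_obtener_geringoso := by
  intro vCadena _
  unfold Spec_obtener_geringoso obtener_geringoso obtener_geringoso_alt
  simp only [PySem.Str.toList_replace]
  have h1 : ("a" : String).toList = ['a'] := rfl
  have h2 : ("apa" : String).toList = ['a','p','a'] := rfl
  have h3 : ("e" : String).toList = ['e'] := rfl
  have h4 : ("epe" : String).toList = ['e','p','e'] := rfl
  have h5 : ("i" : String).toList = ['i'] := rfl
  have h6 : ("ipi" : String).toList = ['i','p','i'] := rfl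
  have h7 : ("o" : String).toList = ['o'] := rfl
  have h8 : ("opo" : String).toList = ['o','p','o'] := rfl
  have h9 : ("u" : String).toList = ['u'] := rfl
  have h10 : ("upu" : String).toList = ['u','p','u'] := rfl
  rw [h1, h2, h3, h4, h5, h6, h7, h8, h9, h10, pvMain]
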